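-- pv_equiv track=rewrite | github.com/azgo14/cursor-agent | cursor_agent/auth.py | summarize_agent_argv_for_log
-- ===== SOURCE A (Python) =====
-- def summarize_agent_argv_for_log(argv: list[str]) -> str:
--     """Join argv for logs, redacting secret values after auth flags."""
--     out: list[str] = []
--     i = 0
--     while i < len(argv):
--         if argv[i] in ("--api-key", "--auth-token") and i + 1 < len(argv):
--             out.append(argv[i])
--             out.append("<redacted>")
--             i += 2
--         else:
--             out.append(argv[i])
--             i += 1
--     return " ".join(out)
-- ===== SOURCE B (Python) =====
-- def summarize_agent_argv_for_log(argv: list[str]) -> str: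
--     """Join argv for logs, redacting secret values after auth flags."""
--     redacted: set[int] = set()
--     for i, tok in enumerate(argv):
--         if i not in redacted and tok in ("--api-key", "--auth-token") and i + 1 < len(argv):
--             redacted.add(i + 1)
--     return " ".join("<redacted>" if i in redacted else tok
--                     for i, tok in enumerate(argv))
-- ===== Notes on version B (the rewrite author's own statement) =====
-- stated objective: alternative
-- what changed: Replaced A's single emit-as-you-go index-skipping while loop by two staged passes: one pass computes the set of index positions to redact, a second pass renders every token of enumerate(argv) by looking its index up in that set.
import Mathlib
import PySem

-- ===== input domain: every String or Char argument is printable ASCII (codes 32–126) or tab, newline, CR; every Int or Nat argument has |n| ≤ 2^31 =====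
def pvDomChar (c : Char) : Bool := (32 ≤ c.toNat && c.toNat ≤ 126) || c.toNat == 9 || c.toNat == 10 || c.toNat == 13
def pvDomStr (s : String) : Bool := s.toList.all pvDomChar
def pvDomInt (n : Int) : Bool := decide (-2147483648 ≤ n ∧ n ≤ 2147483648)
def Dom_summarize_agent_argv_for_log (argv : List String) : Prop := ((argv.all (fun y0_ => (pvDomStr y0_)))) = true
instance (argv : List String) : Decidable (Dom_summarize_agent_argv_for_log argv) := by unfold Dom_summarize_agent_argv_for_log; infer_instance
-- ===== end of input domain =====

-- B changes: instead of A's index-skipping while loop that emits as it goes, B first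
-- computes the SET of redacted positions, then renders every token by index lookup
-- (objective: alternative, two staged passes over an index set).

-- ===== PORT A =====
-- A's while loop over index i, transcribed as recursion on the suffix: the two-step
-- branch consumes two tokens (i += 2), the other consumes one (i += 1).
def pvALoop : List String → List String
  | [] => []
  | [x] => [x]
  | x :: y :: rest =>
    if x == "--api-key" || x == "--auth-token" then
      x :: "<redacted>" :: pvALoop rest
    else
      x :: pvALoop (y :: rest)

def summarize_agent_argv_for_log (argv : List String) : String :=
  PySem.Str.join " " (pvALoop argv)

-- ===== PORT B =====
-- Source B: first loop builds the set `redacted` of indices to mask; the generator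
-- expression then renders each (i, tok) of enumerate(argv).
def summarize_agent_argv_for_log_alt (argv : List String) : String :=
  let n : Int := argv.length
  let redacted : PySem.Set Int :=
    (PySem.List.enumerate argv).foldl
      (fun s p =>
        if !(PySem.Set.contains s p.1)
            && (p.2 == "--api-key" || p.2 == "--auth-token")
            && decide (p.1 + 1 < n) then
          PySem.Set.add s (p.1 + 1)
        else s)
      PySem.Set.empty
  PySem.Str.join " "
    ((PySem.List.enumerate argv).map
      (fun p => if PySem.Set.contains redacted p.1 then "<redacted>" else p.2))

-- ===== PRECONDITION & SPEC =====
def Spec_summarize_agent_argv_for_log (argv : List String) (out : String) : Prop := out = summarize_agent_argv_for_log_alt argv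
instance (argv : List String) (out : String) : Decidable (Spec_summarize_agent_argv_for_log argv out) := by unfold Spec_summarize_agent_argv_for_log; infer_instance

-- ===== CLAIM (what is proved, stated in full; the proofs are below) =====
def Claim_equal_summarize_agent_argv_for_log : Prop := ∀ (argv : List String), Dom_summarize_agent_argv_for_log argv → Spec_summarize_agent_argv_for_log argv (summarize_agent_argv_for_log argv)

-- ===== LEMMAS AND PROOFS =====

-- Specification of the redacted-index set: b = "current position k is itself redacted".
def pvMarks : Int → Bool → List String → List Int
  | _, _, [] => []
  | k, true, _ :: rest => pvMarks (k + 1) false rest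
  | k, false, x :: rest =>
    if (x == "--api-key" || x == "--auth-token") && !rest.isEmpty then
      (k + 1) :: pvMarks (k + 1) true rest
    else
      pvMarks (k + 1) false rest

theorem pvMarks_lb (l : List String) : ∀ (k : Int) (b : Bool) (j : Int), j ∈ pvMarks k b l → k < j := by
  induction l with
  | nil => intro k b j h; simp [pvMarks] at h
  | cons x rest ih =>
    intro k b j h
    cases b with
    | true =>
      simp only [pvMarks] at h
      have := ih (k + 1) false j h; omega
    | false =>
      simp only [pvMarks] at h
      split at h
      · rcases List.mem_cons.1 h with h | h
        · omega
        · have := ih (k + 1) true j h; omega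
      · have := ih (k + 1) false j h; omega

def pvStep (n : Int) (s : PySem.Set Int) (p : Int × String) : PySem.Set Int :=
  if !(PySem.Set.contains s p.1)
      && (p.2 == "--api-key" || p.2 == "--auth-token")
      && decide (p.1 + 1 < n) then
    PySem.Set.add s (p.1 + 1)
  else s

theorem pvFold_mem (n : Int) (l : List String) : ∀ (k : Int) (s : List Int),
    (∀ j ∈ s, j ≤ k) → k + l.length = n →
    ∀ j : Int, (j ∈ (PySem.List.enumerate l k).foldl (pvStep n) s ↔ j ∈ s ∨ j ∈ pvMarks k (decide (k ∈ s)) l) := by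
  induction l with
  | nil => intro k s _ _ j; simp [PySem.List.enumerate, pvMarks]
  | cons x rest ih =>
    intro k s hb hn j
    rw [PySem.List.enumerate_cons, List.foldl_cons]
    have hb' : ∀ j ∈ s, j ≤ k + 1 := fun j hj => by have := hb j hj; omega
    have hk1 : ¬ (k + 1 ∈ s) := fun h => by have := hb _ h; omega
    have hn' : k + 1 + (rest.length : Int) = n := by simp at hn; omega
    by_cases hk : k ∈ s
    · have hstep : pvStep n s (k, x) = s := by
        simp [pvStep]; intro h; exact absurd hk h
      rw [hstep, ih (k + 1) s hb' hn' j]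
      simp [pvMarks, hk, hk1]
    · have hkc : PySem.Set.contains s k = false := by
        rw [Bool.eq_false_iff]; intro h; exact hk ((PySem.Set.contains_iff s k).1 h)
      by_cases hf : ((x == "--api-key" || x == "--auth-token") && !rest.isEmpty) = true
      · have hfl : (x == "--api-key" || x == "--auth-token") = true := by
          exact (Bool.and_eq_true _ _ ▸ hf).1
        have he : rest ≠ [] := by
          have := (Bool.and_eq_true _ _ ▸ hf).2
          intro hr; subst hr; simp at this
        have hlt : (k : Int) + 1 < n := by
          cases rest with
          | nil => exact absurd rfl he
          | cons r rs => simp at hn; omega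
        have hstep : pvStep n s (k, x) = PySem.Set.add s (k + 1) := by
          simp [pvStep, hfl, hlt]; intro h; exact absurd h hk
        have hb'' : ∀ j ∈ PySem.Set.add s (k + 1), j ≤ k + 1 := by
          intro j hj
          rcases (PySem.Set.mem_add _ _ _).1 hj with hj | hj
          · have := hb j hj; omega
          · omega
        have hk1' : (k + 1) ∈ PySem.Set.add s (k + 1) := (PySem.Set.mem_add _ _ _).2 (Or.inr rfl)
        rw [hstep, ih (k + 1) (PySem.Set.add s (k + 1)) hb'' hn' j]
        simp [pvMarks, hk, hf, hk1', PySem.Set.mem_add]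
        tauto
      · have hstep : pvStep n s (k, x) = s := by
          by_cases hfl : (x == "--api-key" || x == "--auth-token") = true
          · have he : rest = [] := by
              by_contra hr
              exact hf (by simp [hfl, hr])
            subst he
            have hge : ¬ ((k : Int) + 1 < n) := by simp at hn; omega
            simp [pvStep, hfl, hge]
          · simp [pvStep, Bool.eq_false_iff.2 hfl]
        rw [hstep, ih (k + 1) s hb' hn' j]
        simp [pvMarks, hk, hf, hk1]

-- The rendering pass with any set agreeing with pvMarks on indices ≥ k equals A's loop.
theorem pvRender (l : List String) : ∀ (k : Int) (F : List Int),
    (∀ j : Int, k ≤ j → (j ∈ F ↔ j ∈ pvMarks k false l)) →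
    (PySem.List.enumerate l k).map (fun p => if PySem.Set.contains F p.1 then "<redacted>" else p.2) = pvALoop l := by
  induction l using pvALoop.induct with
  | case1 => intro k F _; simp [PySem.List.enumerate, pvALoop]
  | case2 x =>
    intro k F hF
    have hk : k ∉ F := by
      intro h
      have := (hF k le_rfl).1 h
      simp [pvMarks] at this
    have : PySem.Set.contains F k = false := by
      rw [Bool.eq_false_iff]; intro h; exact hk ((PySem.Set.contains_iff _ _).1 h)
    simp [PySem.List.enumerate, pvALoop]
    intro h; exact absurd h hk
  | case3 x y rest hfl ih =>
    intro k F hF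
    have hmarks : pvMarks k false (x :: y :: rest) = (k + 1) :: pvMarks (k + 1) true (y :: rest) := by
      simp [pvMarks, hfl]
    have hmarks' : pvMarks (k + 1) true (y :: rest) = pvMarks (k + 2) false rest := by
      show pvMarks (k + 1) true (y :: rest) = _
      simp [pvMarks]; ring_nf
    have hk : k ∉ F := by
      intro h
      have := (hF k le_rfl).1 h
      rw [hmarks, hmarks'] at this
      rcases List.mem_cons.1 this with h' | h'
      · omega
      · have := pvMarks_lb rest (k + 2) false k h'; omega
    have hk1 : (k + 1) ∈ F := by
      refine (hF (k + 1) (by omega)).2 ?_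
      rw [hmarks]; exact List.mem_cons_self
    have hkc : PySem.Set.contains F k = false := by
      rw [Bool.eq_false_iff]; intro h; exact hk ((PySem.Set.contains_iff _ _).1 h)
    have hk1c : PySem.Set.contains F (k + 1) = true := (PySem.Set.contains_iff _ _).2 hk1
    rw [PySem.List.enumerate_cons, PySem.List.enumerate_cons, List.map_cons, List.map_cons]
    have h22 : k + 1 + 1 = k + 2 := by ring
    have htail : (PySem.List.enumerate rest (k + 1 + 1)).map (fun p => if PySem.Set.contains F p.1 then "<redacted>" else p.2) = pvALoop rest := by
      rw [h22]
      refine ih (k + 2) F ?_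
      intro j hj
      rw [hF j (by omega), hmarks, hmarks']
      constructor
      · intro h; rcases List.mem_cons.1 h with h | h
        · omega
        · exact h
      · exact fun h => List.mem_cons.2 (Or.inr h)
    simp only [hkc, hk1c, Bool.false_eq_true, if_false, pvALoop, hfl, if_pos]
    rw [htail]
  | case4 x y rest hfl ih =>
    intro k F hF
    have hmarks : pvMarks k false (x :: y :: rest) = pvMarks (k + 1) false (y :: rest) := by
      simp [pvMarks, hfl]
    have hk : k ∉ F := by
      intro h
      have := (hF k le_rfl).1 h
      rw [hmarks] at this
      have := pvMarks_lb _ (k + 1) false k this; omega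
    have hkc : PySem.Set.contains F k = false := by
      rw [Bool.eq_false_iff]; intro h; exact hk ((PySem.Set.contains_iff _ _).1 h)
    rw [PySem.List.enumerate_cons, List.map_cons]
    have htail := ih (k + 1) F (by
      intro j hj
      rw [hF j (by omega), hmarks])
    simp only [hkc, Bool.false_eq_true, if_false, pvALoop, hfl]
    rw [htail]

-- ===== VERDICT (by name: the statement is the Claim_ definition above) =====
theorem summarize_agent_argv_for_log_spec : Claim_equal_summarize_agent_argv_for_log := by
  intro argv _
  show summarize_agent_argv_for_log argv = summarize_agent_argv_for_log_alt argv
  unfold summarize_agent_argv_for_log summarize_agent_argv_for_log_alt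
  congr 1
  refine (pvRender argv 0 _ ?_).symm
  intro j _
  have h := pvFold_mem (argv.length) argv 0 [] (by simp) (by simp) j
  simp only [List.not_mem_nil, decide_false] at h
  rw [show ((PySem.List.enumerate argv 0).foldl
      (fun s p => if !(PySem.Set.contains s p.1)
          && (p.2 == "--api-key" || p.2 == "--auth-token")
          && decide (p.1 + 1 < (argv.length : Int)) then PySem.Set.add s (p.1 + 1) else s)
      PySem.Set.empty) = (PySem.List.enumerate argv 0).foldl (pvStep (argv.length)) [] from rfl]
  rw [h]
  simp
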